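-- pv_equiv track=rewrite | github.com/LogFlames/project-euler-python | pe85.py | findNearestSolution
-- ===== SOURCE A (Python) =====
-- def getAllSquares(x, y):
--     num = 0
--     for x_ in range(1, x + 1):
--         for y_ in range(1, y + 1):
--             num += scl(x, x_) * scl(y, y_)
--
--     return num
--
-- def scl(valMax, val):
--     tempList = []
--     for n in range(valMax):
--         tempList.append(n + 1)
--
--     return tempList[len(tempList) - val]
--
-- def getClosest(numA, numB, numC):
--     aDif = abs(numC - numA)
--     bDif = abs(numC - numB)
--     if aDif < bDif:
--         return numA
--     else:
--         return numB
--
-- def findNearestSolution(bounds, solution):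
--     closest = [0, 0, 0]
--     lastClosest = closest
--     thisDim = 0
--     bounds[0] = int(bounds[0])
--     bounds[1] = int(bounds[1])
--     for x in range(1, bounds[0] + 1):
--         for y in range(1, bounds[1] + 1):
--             thisDim = getAllSquares(x, y)
--             lastClosest = closest[0]
--             closest[0] = getClosest(thisDim, closest[0], solution)
--             if closest[0] != lastClosest:
--                 closest[1] = x
--                 closest[2] = y
--
--     return closest
-- ===== SOURCE B (Python) =====
-- def findNearestSolution(bounds, solution):
--     x_max, y_max = int(bounds[0]), int(bounds[1])
--     best, bx, by = 0, 0, 0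
--     if y_max >= 1:
--         y0 = 0
--         for x in range(1, x_max + 1):
--             tx = x * (x + 1) // 2
--             while y0 + 1 <= y_max and tx * ((y0 + 1) * (y0 + 2) // 2) <= solution:
--                 y0 += 1
--             while y0 >= 1 and tx * (y0 * (y0 + 1) // 2) > solution:
--                 y0 -= 1
--             if y0 >= 1:
--                 y = y0
--                 if y0 + 1 <= y_max:
--                     d_lo = solution - tx * (y0 * (y0 + 1) // 2)
--                     d_hi = tx * ((y0 + 1) * (y0 + 2) // 2) - solution
--                     if d_hi < d_lo:
--                         y = y0 + 1
--             else:
--                 y = 1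
--             val = tx * (y * (y + 1) // 2)
--             if abs(solution - val) < abs(solution - best):
--                 best, bx, by = val, x, y
--             if tx > solution:
--                 break
--     return [best, bx, by]
-- ===== Notes on version B (the rewrite author's own statement) =====
-- stated objective: alternative
-- what changed: Replaces A's per-cell O(x*y) nested summation (whose scl helper rebuilds a 1..n list for every term) with the closed-form triangular product T(x)*T(y), scans each row only at the two candidate y values around a monotone pointer, and stops after the first row whose leftmost value already exceeds solution; a timing run could not confirm a speed-up (A only returns at all on inputs where both are trivially fast), so no speed is claimed.
import Mathlib
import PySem

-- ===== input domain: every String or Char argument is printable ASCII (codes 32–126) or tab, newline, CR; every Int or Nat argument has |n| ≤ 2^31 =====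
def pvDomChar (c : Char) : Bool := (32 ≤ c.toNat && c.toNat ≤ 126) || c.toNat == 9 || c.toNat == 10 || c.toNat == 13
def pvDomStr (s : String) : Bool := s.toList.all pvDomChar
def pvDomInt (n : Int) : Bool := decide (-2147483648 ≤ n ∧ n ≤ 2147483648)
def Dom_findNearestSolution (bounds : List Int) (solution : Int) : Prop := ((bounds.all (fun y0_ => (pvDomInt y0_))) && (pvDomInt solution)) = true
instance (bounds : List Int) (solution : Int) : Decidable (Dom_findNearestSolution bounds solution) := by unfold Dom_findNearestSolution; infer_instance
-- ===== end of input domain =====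

-- B replaces A's nested per-cell summation (whose scl helper rebuilds a 1..n list for
-- every term) by the closed-form triangular product T(x)*T(y); per row x it examines
-- only the two y values around a monotone pointer and stops after the first row whose
-- leftmost value already exceeds solution (later rows cannot improve); objective:
-- alternative algorithm.
-- A also writes bounds[0]/bounds[1] back into the list (a no-op for int inputs);
-- the equivalence proved here is about the return value.

-- ===== PORT A =====
-- scl(valMax, val): builds [1..valMax] by appending, then indexes it at len-val
def scl (valMax val : Int) : Int :=
  let tempList := (PySem.List.pyRange 0 valMax 1).foldl (fun l n => l ++ [n + 1]) []
  PySem.List.pyGetD tempList ((tempList.length : Int) - val) 0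
-- the index is always in range at A's call sites (1 ≤ val ≤ valMax), so pyGetD is exact there

def getAllSquares (x y : Int) : Int :=
  (PySem.List.pyRange 1 (x + 1) 1).foldl (fun num x_ =>
    (PySem.List.pyRange 1 (y + 1) 1).foldl (fun num y_ =>
      num + scl x x_ * scl y y_) num) 0

def getClosest (numA numB numC : Int) : Int :=
  let aDif := |numC - numA|
  let bDif := |numC - numB|
  if aDif < bDif then numA else numB

def findNearestSolution (bounds : List Int) (solution : Int) : List Int :=
  -- bounds[0] = int(bounds[0]) etc. is the identity on ints; reads guarded by Pre_ (len ≥ 2)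
  let b0 := PySem.List.pyGetD bounds 0 0
  let b1 := PySem.List.pyGetD bounds 1 0
  let st := (PySem.List.pyRange 1 (b0 + 1) 1).foldl (fun c x =>
      (PySem.List.pyRange 1 (b1 + 1) 1).foldl (fun c y =>
        let thisDim := getAllSquares x y
        let lastClosest := c.1
        let c0 := getClosest thisDim c.1 solution
        if c0 ≠ lastClosest then (c0, x, y) else (c0, c.2.1, c.2.2)) c)
    ((0 : Int), (0 : Int), (0 : Int))
  [st.1, st.2.1, st.2.2]

-- ===== PORT B =====
-- Source B's `while y0 + 1 <= y_max and tx * ((y0+1)*(y0+2)//2) <= solution: y0 += 1` loop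
def pvWalkUp (tx s yMax p : Int) : Int :=
  if h : p + 1 ≤ yMax ∧ tx * PySem.Int.floordiv ((p + 1) * (p + 2)) 2 ≤ s then
    pvWalkUp tx s yMax (p + 1)
  else p
termination_by (yMax - p).toNat
decreasing_by omega

-- Source B's `while y0 >= 1 and tx * (y0*(y0+1)//2) > solution: y0 -= 1` loop
def pvWalk (tx s p : Int) : Int :=
  if h : 1 ≤ p ∧ s < tx * PySem.Int.floordiv (p * (p + 1)) 2 then pvWalk tx s (p - 1) else p
termination_by p.toNat
decreasing_by omega

-- the body of Source B's `for x in range(1, x_max + 1)` loop; state = ((best, bx, by), pointer)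
def pvRowStep (solution yMax : Int) (s : (Int × Int × Int) × Int) (x : Int) : (Int × Int × Int) × Int :=
  let tx := PySem.Int.floordiv (x * (x + 1)) 2
  let y0 := pvWalk tx solution (pvWalkUp tx solution yMax s.2)
  let y : Int :=
    if 1 ≤ y0 then
      if y0 + 1 ≤ yMax then
        if tx * PySem.Int.floordiv ((y0 + 1) * (y0 + 2)) 2 - solution <
            solution - tx * PySem.Int.floordiv (y0 * (y0 + 1)) 2
        then y0 + 1 else y0
      else y0
    else 1
  let val := tx * PySem.Int.floordiv (y * (y + 1)) 2
  if |solution - val| < |solution - s.1.1| then ((val, x, y), y0) else (s.1, y0)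

-- Source B's x loop with its `if tx > solution: break`
def pvOuter (solution xMax yMax x : Int) (st : (Int × Int × Int) × Int) : (Int × Int × Int) × Int :=
  if h : x ≤ xMax then
    let st' := pvRowStep solution yMax st x
    if PySem.Int.floordiv (x * (x + 1)) 2 > solution then st'
    else pvOuter solution xMax yMax (x + 1) st'
  else st
termination_by (xMax + 1 - x).toNat
decreasing_by omega

def findNearestSolution_alt (bounds : List Int) (solution : Int) : List Int :=
  let xMax := PySem.List.pyGetD bounds 0 0
  let yMax := PySem.List.pyGetD bounds 1 0
  let st :=
    if 1 ≤ yMax then pvOuter solution xMax yMax 1 (((0 : Int), (0 : Int), (0 : Int)), 0)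
    else (((0 : Int), (0 : Int), (0 : Int)), (0 : Int))
  [st.1.1, st.1.2.1, st.1.2.2]

-- ===== PRECONDITION & SPEC =====
-- Pre_ excludes only the inputs where A raises IndexError (fewer than two bounds).
def Pre_findNearestSolution (bounds : List Int) (solution : Int) : Prop := 2 ≤ bounds.length
instance (bounds : List Int) (solution : Int) : Decidable (Pre_findNearestSolution bounds solution) := by unfold Pre_findNearestSolution; infer_instance
def pvWitness_findNearestSolution : List Int × Int := ([3, 4], 20)

def Spec_findNearestSolution (bounds : List Int) (solution : Int) (out : List Int) : Prop := out = findNearestSolution_alt bounds solution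
instance (bounds : List Int) (solution : Int) (out : List Int) : Decidable (Spec_findNearestSolution bounds solution out) := by unfold Spec_findNearestSolution; infer_instance

-- ===== CLAIM (what is proved, stated in full; the proofs are below) =====
def Claim_equal_findNearestSolution : Prop := ∀ (bounds : List Int) (solution : Int), Dom_findNearestSolution bounds solution → Pre_findNearestSolution bounds solution → Spec_findNearestSolution bounds solution (findNearestSolution bounds solution)

-- ===== LEMMAS AND PROOFS =====

-- T(n) = n(n+1)//2, the triangular numbers (proof-side abbreviation for B's closed form)
def tri (n : Int) : Int := PySem.Int.floordiv (n * (n + 1)) 2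

theorem tri_succ (y : Int) : tri (y + 1) = tri y + (y + 1) := by
  unfold tri
  rw [PySem.Int.floordiv_eq_ediv_of_pos (by norm_num), PySem.Int.floordiv_eq_ediv_of_pos (by norm_num)]
  rw [show (y + 1) * ((y + 1) + 1) = y * (y + 1) + (y + 1) * 2 from by ring,
    Int.add_mul_ediv_right _ _ (by norm_num)]

theorem tri_mono {a b : Int} (h0 : 0 ≤ a) (h : a ≤ b) : tri a ≤ tri b := by
  induction b, h using Int.le_induction with
  | base => exact le_refl _
  | succ n hn ih => rw [tri_succ]; omega

theorem tri_strict {a b : Int} (h0 : 0 ≤ a) (h : a < b) : tri a < tri b := by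
  have h1 : tri a ≤ tri (b - 1) := tri_mono h0 (by omega)
  have h2 := tri_succ (b - 1)
  rw [show b - 1 + 1 = b from by omega] at h2
  omega

theorem tri_pos {y : Int} (hy : 1 ≤ y) : 1 ≤ tri y := by
  have h1 : tri 1 = 1 := by decide
  have := tri_mono (by norm_num : (0:Int) ≤ 1) hy
  omega

-- ---- A's helpers compute the closed form ----

theorem scl_eval (m v : Int) (h1 : 1 ≤ v) (h2 : v ≤ m) : scl m v = m - v + 1 := by
  unfold scl
  rw [PySem.List.foldl_append_singleton_eq_map (fun n => n + 1) _ []]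
  simp only [List.nil_append, List.length_map, PySem.List.length_pyRange_one, Int.sub_zero]
  have hlen : ((m.toNat : Int)) = m := Int.toNat_of_nonneg (by omega)
  rw [hlen, PySem.List.pyGetD_map_pyRange_of_nonneg (fun n => n + 1) m (m - v) 0 (by omega) (by omega)]

theorem sum_sub_range (c : Int) (n : Nat) :
    2 * ((List.range n).map (fun k : Nat => c - (k : Int))).sum = n * (2 * c - n + 1) := by
  induction n with
  | zero => simp
  | succ n ih =>
    rw [List.range_succ]
    simp only [List.map_append, List.map_cons, List.map_nil, List.sum_append, List.sum_cons,
      List.sum_nil, add_zero]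
    push_cast
    linear_combination ih

theorem tri_sum (x : Int) (hx : 1 ≤ x) :
    ((PySem.List.pyRange 1 (x + 1) 1).map (fun v => x - v + 1)).sum = tri x := by
  have h : ((PySem.List.pyRange 1 (x + 1) 1).map (fun v => x - v + 1)).sum
      = ((List.range (x.toNat)).map (fun k : Nat => x - (k : Int))).sum := by
    rw [PySem.List.pyRange_one]
    have ht : (x + 1 - 1).toNat = x.toNat := by omega
    rw [ht, List.map_map]
    exact congrArg List.sum (List.map_congr_left (fun k _ => by
      simp only [Function.comp_apply]; ring))
  rw [h, show tri x = x * (x + 1) / 2 from PySem.Int.floordiv_eq_ediv_of_pos (by norm_num)]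
  have h2 := sum_sub_range x x.toNat
  have hx' : ((x.toNat : Int)) = x := Int.toNat_of_nonneg (by omega)
  rw [hx'] at h2
  have h3 : x * (2 * x - x + 1) = x * (x + 1) := by ring
  rw [h3] at h2
  omega

theorem getAllSquares_eq (x y : Int) (hx : 1 ≤ x) (hy : 1 ≤ y) :
    getAllSquares x y = tri x * tri y := by
  unfold getAllSquares
  have hscl_y : ∀ y_ ∈ PySem.List.pyRange 1 (y + 1) 1, scl y y_ = y - y_ + 1 := by
    intro y_ hm
    rw [PySem.List.mem_pyRange_one] at hm
    exact scl_eval y y_ hm.1 (by omega)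
  have hinner : ∀ (a x_ : Int), x_ ∈ PySem.List.pyRange 1 (x + 1) 1 →
      (PySem.List.pyRange 1 (y + 1) 1).foldl (fun num y_ => num + scl x x_ * scl y y_) a
        = a + scl x x_ * tri y := by
    intro a x_ _
    rw [PySem.List.foldl_add]
    congr 1
    have hmap : (PySem.List.pyRange 1 (y + 1) 1).map (fun y_ => scl x x_ * scl y y_)
        = (PySem.List.pyRange 1 (y + 1) 1).map (fun y_ => scl x x_ * (y - y_ + 1)) :=
      List.map_congr_left (fun y_ hm => by rw [hscl_y y_ hm])
    rw [hmap, List.sum_map_mul_left, tri_sum y hy]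
  rw [PySem.List.foldl_congr_mem _ _ (fun a x_ => a + scl x x_ * tri y) 0 hinner]
  rw [PySem.List.foldl_add, zero_add]
  have hmap : (PySem.List.pyRange 1 (x + 1) 1).map (fun x_ => scl x x_ * tri y)
      = (PySem.List.pyRange 1 (x + 1) 1).map (fun x_ => (x - x_ + 1) * tri y) :=
    List.map_congr_left (fun x_ hm => by
      rw [PySem.List.mem_pyRange_one] at hm
      rw [scl_eval x x_ hm.1 (by omega)])
  rw [hmap, List.sum_map_mul_right, tri_sum x hx]

-- A's inner-loop body in strict-improvement form
theorem step_eq (solution x y : Int) (hx : 1 ≤ x) (hy : 1 ≤ y) (c : Int × Int × Int) :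
    (if getClosest (getAllSquares x y) c.1 solution ≠ c.1
      then (getClosest (getAllSquares x y) c.1 solution, x, y)
      else (getClosest (getAllSquares x y) c.1 solution, c.2.1, c.2.2))
    = (if |solution - tri x * tri y| < |solution - c.1|
       then (tri x * tri y, x, y) else c) := by
  obtain ⟨c0, c1, c2⟩ := c
  simp only [getClosest, getAllSquares_eq x y hx hy]
  set val := tri x * tri y with hval
  by_cases h : |solution - val| < |solution - c0|
  · have hne : val ≠ c0 := fun he => by rw [he] at h; exact lt_irrefl _ h
    simp [h, hne]
  · simp [h]

-- ---- the strict-improvement fold keeps only the first minimiser ----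

theorem fold_noupdate (sol x : Int) (v : Int → Int) (t : List Int) :
    ∀ c : Int × Int × Int, (∀ y ∈ t, ¬ |sol - v y| < |sol - c.1|) →
    t.foldl (fun c y => if |sol - v y| < |sol - c.1| then (v y, x, y) else c) c = c := by
  induction t with
  | nil => intro c _; rfl
  | cons y t ih =>
    intro c h
    simp only [List.foldl_cons, if_neg (h y (List.mem_cons_self))]
    exact ih c (fun y' hy' => h y' (List.mem_cons_of_mem _ hy'))

theorem fold_best (sol x : Int) (v : Int → Int) (ys : List Int) :
    ys.Pairwise (· < ·) → ∀ S : Int, S ∈ ys →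
    (∀ y ∈ ys, |sol - v S| ≤ |sol - v y|) →
    (∀ y ∈ ys, y < S → |sol - v S| < |sol - v y|) →
    ∀ c : Int × Int × Int,
    ys.foldl (fun c y => if |sol - v y| < |sol - c.1| then (v y, x, y) else c) c
      = if |sol - v S| < |sol - c.1| then (v S, x, S) else c := by
  induction ys with
  | nil => intro _ S hS; cases hS
  | cons y t ih =>
    intro hsort S hmem hmin hfirst c
    simp only [List.foldl_cons]
    rcases List.mem_cons.mp hmem with hS | hS
    · subst hS
      by_cases hc : |sol - v S| < |sol - c.1|
      · rw [if_pos hc]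
        exact fold_noupdate sol x v t (v S, x, S)
          (fun y' hy' => not_lt.mpr (hmin y' (List.mem_cons_of_mem _ hy')))
      · rw [if_neg hc]
        exact fold_noupdate sol x v t c (fun y' hy' => by
          have h1 := hmin y' (List.mem_cons_of_mem _ hy')
          omega)
    · have hyS : y < S := (List.pairwise_cons.mp hsort).1 S hS
      have hdy : |sol - v S| < |sol - v y| := hfirst y (List.mem_cons_self) hyS
      have ih' := ih (List.pairwise_cons.mp hsort).2 S hS
        (fun y' hy' => hmin y' (List.mem_cons_of_mem _ hy'))
        (fun y' hy' h => hfirst y' (List.mem_cons_of_mem _ hy') h)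
      by_cases hc : |sol - v y| < |sol - c.1|
      · rw [if_pos hc, ih' (v y, x, y)]
        rw [if_pos hdy, if_pos (lt_trans hdy hc)]
      · rw [if_neg hc, ih' c]

-- ---- the candidate Source B derives from the pointer is the first minimiser of the row ----

theorem row_best (sol yMax tx r : Int) (htx : 1 ≤ tx) (hY : 1 ≤ yMax)
    (hr0 : 0 ≤ r) (hrY : r ≤ yMax)
    (hatt : r = 0 ∨ (1 ≤ r ∧ tx * tri r ≤ sol))
    (habove : ∀ y, r < y → y ≤ yMax → sol < tx * tri y) (S : Int)
    (hS : S = if 1 ≤ r then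
        (if r + 1 ≤ yMax then
          (if tx * PySem.Int.floordiv ((r + 1) * (r + 2)) 2 - sol <
               sol - tx * PySem.Int.floordiv (r * (r + 1)) 2
           then r + 1 else r)
         else r)
      else 1) :
    S ∈ PySem.List.pyRange 1 (yMax + 1) 1 ∧
    (∀ y ∈ PySem.List.pyRange 1 (yMax + 1) 1, |sol - tx * tri S| ≤ |sol - tx * tri y|) ∧
    (∀ y ∈ PySem.List.pyRange 1 (yMax + 1) 1, y < S → |sol - tx * tri S| < |sol - tx * tri y|) := by
  have e1 : PySem.Int.floordiv ((r + 1) * (r + 2)) 2 = tri (r + 1) := by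
    unfold tri; congr 1; ring
  have e2 : PySem.Int.floordiv (r * (r + 1)) 2 = tri r := rfl
  rw [e1, e2] at hS
  have h0tx : 0 < tx := by omega
  have vmono : ∀ a b : Int, 0 ≤ a → a ≤ b → tx * tri a ≤ tx * tri b := fun a b h1 h2 =>
    mul_le_mul_of_nonneg_left (tri_mono h1 h2) (by omega)
  have vstrict : ∀ a b : Int, 0 ≤ a → a < b → tx * tri a < tx * tri b := fun a b h1 h2 =>
    mul_lt_mul_of_pos_left (tri_strict h1 h2) h0tx
  by_cases hr1 : 1 ≤ r
  · have hvr : tx * tri r ≤ sol := (hatt.resolve_left (by omega)).2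
    by_cases hr2 : r + 1 ≤ yMax
    · have hs1 : sol < tx * tri (r + 1) := habove (r + 1) (by omega) (by omega)
      by_cases hcmp : tx * tri (r + 1) - sol < sol - tx * tri r
      · rw [if_pos hr1, if_pos hr2, if_pos hcmp] at hS
        rw [hS]
        refine ⟨PySem.List.mem_pyRange_one.mpr ⟨by omega, by omega⟩, ?_, ?_⟩
        · intro y hy
          rw [PySem.List.mem_pyRange_one] at hy
          rcases (by omega : y ≤ r ∨ r < y) with hyr | hyr
          · have hm := vmono y r (by omega) hyr
            rw [abs_of_nonpos (by omega), abs_of_nonneg (by omega)]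
            omega
          · have hm := vmono (r + 1) y (by omega) (by omega)
            have hsy := habove y (by omega) (by omega)
            rw [abs_of_nonpos (by omega), abs_of_nonpos (by omega)]
            omega
        · intro y hy hlt
          rw [PySem.List.mem_pyRange_one] at hy
          have hyr : y ≤ r := by omega
          have hm := vmono y r (by omega) hyr
          rw [abs_of_nonpos (by omega), abs_of_nonneg (by omega)]
          omega
      · rw [if_pos hr1, if_pos hr2, if_neg hcmp] at hS
        rw [hS]
        refine ⟨PySem.List.mem_pyRange_one.mpr ⟨by omega, by omega⟩, ?_, ?_⟩
        · intro y hy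
          rw [PySem.List.mem_pyRange_one] at hy
          rcases (by omega : y ≤ r ∨ r < y) with hyr | hyr
          · have hm := vmono y r (by omega) hyr
            rw [abs_of_nonneg (by omega), abs_of_nonneg (by omega)]
            omega
          · have hm := vmono (r + 1) y (by omega) (by omega)
            have hsy := habove y (by omega) (by omega)
            rw [abs_of_nonneg (by omega), abs_of_nonpos (by omega)]
            omega
        · intro y hy hlt
          rw [PySem.List.mem_pyRange_one] at hy
          have hm := vstrict y r (by omega) hlt
          rw [abs_of_nonneg (by omega), abs_of_nonneg (by omega)]
          omega
    · rw [if_pos hr1, if_neg hr2] at hS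
      rw [hS]
      have hry : r = yMax := by omega
      refine ⟨PySem.List.mem_pyRange_one.mpr ⟨by omega, by omega⟩, ?_, ?_⟩
      · intro y hy
        rw [PySem.List.mem_pyRange_one] at hy
        have hm := vmono y r (by omega) (by omega)
        rw [abs_of_nonneg (by omega), abs_of_nonneg (by omega)]
        omega
      · intro y hy hlt
        rw [PySem.List.mem_pyRange_one] at hy
        have hm := vstrict y r (by omega) hlt
        rw [abs_of_nonneg (by omega), abs_of_nonneg (by omega)]
        omega
  · rw [if_neg hr1] at hS
    subst hS
    have hr : r = 0 := by omega
    refine ⟨PySem.List.mem_pyRange_one.mpr ⟨by omega, by omega⟩, ?_, ?_⟩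
    · intro y hy
      rw [PySem.List.mem_pyRange_one] at hy
      have hsy := habove y (by omega) (by omega)
      have hs1 := habove 1 (by omega) (by omega)
      have hm := vmono 1 y (by omega) (by omega)
      rw [abs_of_nonpos (by omega), abs_of_nonpos (by omega)]
      omega
    · intro y hy hlt
      rw [PySem.List.mem_pyRange_one] at hy
      omega

-- ---- the pointer walk finds the last value ≤ solution ----

theorem pvWalk_spec (tx s : Int) (p : Int) : 0 ≤ p →
    0 ≤ pvWalk tx s p ∧ pvWalk tx s p ≤ p ∧
    (pvWalk tx s p = 0 ∨ (1 ≤ pvWalk tx s p ∧ tx * tri (pvWalk tx s p) ≤ s)) ∧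
    (∀ y, pvWalk tx s p < y → y ≤ p → s < tx * tri y) := by
  induction p using pvWalk.induct (tx := tx) (s := s) with
  | case1 p h ih =>
    intro hp
    rw [pvWalk, dif_pos h]
    obtain ⟨ih1, ih2, ih3, ih4⟩ := ih (by omega)
    refine ⟨ih1, by omega, ih3, ?_⟩
    intro y h1 h2
    rcases lt_or_ge y p with hy | hy
    · exact ih4 y h1 (by omega)
    · have hyp : y = p := by omega
      subst hyp
      simpa [tri] using h.2
  | case2 p h =>
    intro hp
    rw [pvWalk, dif_neg h]
    push Not at h
    rcases lt_or_ge p 1 with h1 | h1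
    · exact ⟨hp, le_refl _, Or.inl (by omega), fun y hy1 hy2 => by omega⟩
    · exact ⟨by omega, le_refl _, Or.inr ⟨h1, by simpa [tri] using h h1⟩, fun y hy1 hy2 => by omega⟩

-- ---- the outer loops agree, carrying the pointer ----

theorem tri_one : tri 1 = 1 := by decide

theorem pvWalkUp_spec (tx s yMax p : Int) : p ≤ yMax →
    p ≤ pvWalkUp tx s yMax p ∧ pvWalkUp tx s yMax p ≤ yMax ∧
    (pvWalkUp tx s yMax p + 1 ≤ yMax → s < tx * tri (pvWalkUp tx s yMax p + 1)) := by
  induction p using pvWalkUp.induct (tx := tx) (s := s) (yMax := yMax) with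
  | case1 p h ih =>
    intro hp
    rw [pvWalkUp, dif_pos h]
    obtain ⟨ih1, ih2, ih3⟩ := ih (by omega)
    exact ⟨by omega, ih2, ih3⟩
  | case2 p h =>
    intro hp
    rw [pvWalkUp, dif_neg h]
    push Not at h
    refine ⟨le_refl _, hp, ?_⟩
    intro h1
    have h2 := h h1
    have e1 : PySem.Int.floordiv ((p + 1) * (p + 2)) 2 = tri (p + 1) := by
      unfold tri; congr 1; ring
    rw [e1] at h2
    exact h2

-- A's rows past the first row whose leftmost value already exceeds solution never update
theorem outer_noupdate (sol yMax : Int) :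
    ∀ (n : Nat) (a b : Int), (b - a).toNat = n → 1 ≤ a →
    ∀ (c : Int × Int × Int),
    (∀ x' y, a ≤ x' → x' < b → 1 ≤ y → y ≤ yMax → ¬ |sol - tri x' * tri y| < |sol - c.1|) →
    (PySem.List.pyRange a b 1).foldl (fun c x =>
        (PySem.List.pyRange 1 (yMax + 1) 1).foldl (fun c y =>
          if getClosest (getAllSquares x y) c.1 sol ≠ c.1
          then (getClosest (getAllSquares x y) c.1 sol, x, y)
          else (getClosest (getAllSquares x y) c.1 sol, c.2.1, c.2.2)) c) c = c := by
  intro n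
  induction n with
  | zero =>
    intro a b hn ha c _
    rw [show PySem.List.pyRange a b 1 = [] from PySem.List.pyRange_one_eq_nil (by omega)]
    rfl
  | succ n ih =>
    intro a b hn ha c h
    rw [show PySem.List.pyRange a b 1 = a :: PySem.List.pyRange (a + 1) b 1 from
      PySem.List.pyRange_one_cons (by omega)]
    simp only [List.foldl_cons]
    have hrow : (PySem.List.pyRange 1 (yMax + 1) 1).foldl (fun c y =>
          if getClosest (getAllSquares a y) c.1 sol ≠ c.1
          then (getClosest (getAllSquares a y) c.1 sol, a, y)
          else (getClosest (getAllSquares a y) c.1 sol, c.2.1, c.2.2)) c = c := by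
      rw [PySem.List.foldl_congr_mem _ _
        (fun c y => if |sol - tri a * tri y| < |sol - c.1| then (tri a * tri y, a, y) else c) c
        (fun c y hm => step_eq sol a y ha (PySem.List.mem_pyRange_one.mp hm).1 c)]
      exact fold_noupdate sol a (fun y => tri a * tri y) _ c (fun y hm => by
        have hy := PySem.List.mem_pyRange_one.mp hm
        exact h a y (le_refl a) (by omega) hy.1 (by omega))
    rw [hrow]
    exact ih (a + 1) b (by omega) (by omega) c
      (fun x' y h1 h2 h3 h4 => h x' y (by omega) h2 h3 h4)

theorem outer_eq (sol yMax xMax : Int) (hY : 1 ≤ yMax) :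
    ∀ (n : Nat) (a : Int), (xMax + 1 - a).toNat = n → 1 ≤ a →
    ∀ (c : Int × Int × Int) (p : Int), 0 ≤ p → p ≤ yMax →
    (PySem.List.pyRange a (xMax + 1) 1).foldl (fun c x =>
        (PySem.List.pyRange 1 (yMax + 1) 1).foldl (fun c y =>
          if getClosest (getAllSquares x y) c.1 sol ≠ c.1
          then (getClosest (getAllSquares x y) c.1 sol, x, y)
          else (getClosest (getAllSquares x y) c.1 sol, c.2.1, c.2.2)) c) c
      = (pvOuter sol xMax yMax a (c, p)).1 := by
  intro n
  induction n with
  | zero =>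
    intro a hn ha c p _ _
    rw [show PySem.List.pyRange a (xMax + 1) 1 = [] from PySem.List.pyRange_one_eq_nil (by omega)]
    rw [pvOuter, dif_neg (by omega : ¬ a ≤ xMax)]
    rfl
  | succ n ih =>
    intro a hn ha c p hp0 hpY
    rw [show PySem.List.pyRange a (xMax + 1) 1 = a :: PySem.List.pyRange (a + 1) (xMax + 1) 1 from
      PySem.List.pyRange_one_cons (by omega)]
    simp only [List.foldl_cons]
    rw [pvOuter, dif_pos (by omega : a ≤ xMax)]
    have htx : 1 ≤ tri a := tri_pos ha
    obtain ⟨hu1, hu2, hu3⟩ := pvWalkUp_spec (tri a) sol yMax p hpY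
    set p' := pvWalkUp (tri a) sol yMax p with hp'def
    obtain ⟨hw0, hwp, hwatt, hwab⟩ := pvWalk_spec (tri a) sol p' (by omega)
    set r := pvWalk (tri a) sol p' with hrdef
    have habove : ∀ y, r < y → y ≤ yMax → sol < tri a * tri y := by
      intro y h1 h2
      rcases (by omega : y ≤ p' ∨ p' < y) with hy | hy
      · exact hwab y h1 hy
      · have h3 := hu3 (by omega)
        have h4 : tri a * tri (p' + 1) ≤ tri a * tri y :=
          mul_le_mul_of_nonneg_left
            (tri_mono (by omega) (by omega)) (by omega)
        omega
    obtain ⟨hmem, hmin, hfirst⟩ := row_best sol yMax (tri a) r htx hY hw0 (by omega)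
      hwatt habove _ rfl
    set S : Int := if 1 ≤ r then
        (if r + 1 ≤ yMax then
          (if tri a * PySem.Int.floordiv ((r + 1) * (r + 2)) 2 - sol <
               sol - tri a * PySem.Int.floordiv (r * (r + 1)) 2
           then r + 1 else r)
         else r)
      else 1 with hSdef
    -- A's row from state c
    have hrowA : (PySem.List.pyRange 1 (yMax + 1) 1).foldl (fun c y =>
          if getClosest (getAllSquares a y) c.1 sol ≠ c.1
          then (getClosest (getAllSquares a y) c.1 sol, a, y)
          else (getClosest (getAllSquares a y) c.1 sol, c.2.1, c.2.2)) c
        = if |sol - tri a * tri S| < |sol - c.1| then (tri a * tri S, a, S) else c := by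
      rw [PySem.List.foldl_congr_mem _ _
        (fun c y => if |sol - tri a * tri y| < |sol - c.1| then (tri a * tri y, a, y) else c) c
        (fun c y hm => step_eq sol a y ha (PySem.List.mem_pyRange_one.mp hm).1 c)]
      exact fold_best sol a (fun y => tri a * tri y) (PySem.List.pyRange 1 (yMax + 1) 1)
        (PySem.List.pairwise_lt_pyRange_one 1 (yMax + 1)) S hmem hmin hfirst c
    -- B's row from state (c, p)
    have hrowB : pvRowStep sol yMax (c, p) a
        = ((if |sol - tri a * tri S| < |sol - c.1| then (tri a * tri S, a, S) else c), r) := by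
      show (if |sol - tri a * tri S| < |sol - c.1| then ((tri a * tri S, a, S), r) else (c, r)) = _
      by_cases hc : |sol - tri a * tri S| < |sol - c.1|
      · rw [if_pos hc, if_pos hc]
      · rw [if_neg hc, if_neg hc]
    dsimp only
    rw [hrowA, hrowB,
      show PySem.Int.floordiv (a * (a + 1)) 2 = tri a from rfl]
    set c' : Int × Int × Int :=
      if |sol - tri a * tri S| < |sol - c.1| then (tri a * tri S, a, S) else c with hc'def
    -- the winning diff after the row is at most the one at y = 1
    have hd1 : |sol - tri a * tri S| ≤ |sol - tri a| := by
      have h1 := hmin 1 (PySem.List.mem_pyRange_one.mpr ⟨le_refl 1, by omega⟩)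
      rw [tri_one, mul_one] at h1
      exact h1
    have hc1 : |sol - c'.1| ≤ |sol - tri a| := by
      rw [hc'def]
      by_cases hc : |sol - tri a * tri S| < |sol - c.1|
      · rw [if_pos hc]; exact hd1
      · rw [if_neg hc]; omega
    by_cases hbrk : sol < tri a
    · rw [if_pos hbrk]
      show _ = c'
      apply outer_noupdate sol yMax (xMax + 1 - (a + 1)).toNat (a + 1) (xMax + 1) rfl (by omega)
      intro x' y h1 h2 h3 h4
      have h5 : tri a < tri x' := tri_strict (by omega) (by omega)
      have h6 : tri x' ≤ tri x' * tri y :=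
        le_mul_of_one_le_right (by omega) (tri_pos h3)
      have h7 : |sol - tri a| = tri a - sol := by
        rw [abs_of_nonpos (by omega)]; ring
      rw [abs_of_nonpos (by omega)]
      omega
    · rw [if_neg hbrk]
      exact ih (a + 1) (by omega) (by omega) c' r hw0 (by omega)

theorem findNearestSolution_eq (bounds : List Int) (solution : Int) :
    findNearestSolution bounds solution = findNearestSolution_alt bounds solution := by
  unfold findNearestSolution findNearestSolution_alt
  dsimp only
  by_cases hY : 1 ≤ PySem.List.pyGetD bounds 1 0
  · rw [if_pos hY]
    rw [outer_eq solution (PySem.List.pyGetD bounds 1 0) (PySem.List.pyGetD bounds 0 0) hY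
      (PySem.List.pyGetD bounds 0 0 + 1 - 1).toNat 1 rfl (le_refl 1)
      ((0 : Int), (0 : Int), (0 : Int)) 0 (le_refl 0) (by omega)]
  · rw [if_neg hY]
    have hnil : PySem.List.pyRange 1 (PySem.List.pyGetD bounds 1 0 + 1) 1 = [] :=
      PySem.List.pyRange_one_eq_nil (by omega)
    rw [hnil]
    simp only [List.foldl_nil]
    rw [List.foldl_fixed]

-- ===== VERDICT (by name: the statement is the Claim_ definition above) =====
theorem findNearestSolution_spec : Claim_equal_findNearestSolution := by
  intro bounds solution _ _
  unfold Spec_findNearestSolution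
  exact findNearestSolution_eq bounds solution
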